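-- pv_equiv track=rewrite | github.com/24127135/Futoshiki-Project | src/futoshiki/solvers/brute_force.py | brute_force_solve
-- ===== SOURCE A (Python) =====
-- from typing import Dict, List, Optional, Tuple
--
-- def is_valid(
--     grid: List[List[int]],
--     r: int,
--     c: int,
--     v: int,
--     h_constraints: List[List[int]],
--     v_constraints: List[List[int]],
--     N: int,
-- ) -> bool:
--     for j in range(N):
--         if j != c and grid[r][j] == v:
--             return False
--
--     for i in range(N):
--         if i != r and grid[i][c] == v:
--             return False
--
--     if c > 0 and grid[r][c - 1] != 0:
--         left_val = grid[r][c - 1]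
--         relation = h_constraints[r][c - 1]
--         if relation == 1 and not (left_val < v):
--             return False
--         if relation == -1 and not (left_val > v):
--             return False
--
--     if c < N - 1 and grid[r][c + 1] != 0:
--         right_val = grid[r][c + 1]
--         relation = h_constraints[r][c]
--         if relation == 1 and not (v < right_val):
--             return False
--         if relation == -1 and not (v > right_val):
--             return False
--
--     if r > 0 and grid[r - 1][c] != 0:
--         top_val = grid[r - 1][c]
--         relation = v_constraints[r - 1][c]
--         if relation == 1 and not (top_val < v):
--             return False
--         if relation == -1 and not (top_val > v):
--             return False
--
--     if r < N - 1 and grid[r + 1][c] != 0: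
--         bottom_val = grid[r + 1][c]
--         relation = v_constraints[r][c]
--         if relation == 1 and not (v < bottom_val):
--             return False
--         if relation == -1 and not (v > bottom_val):
--             return False
--
--     return True
--
-- def brute_force_solve(
--     grid: List[List[int]],
--     h_constraints: List[List[int]],
--     v_constraints: List[List[int]],
--     N: int,
--     stats: Dict[str, int],
-- ) -> Optional[List[List[int]]]:
--     stats.setdefault("calls", 0)
--     stats.setdefault("backtracks", 0)
--
--     for r in range(N):
--         for c in range(N):
--             if grid[r][c] != 0:
--                 continue
--
--             for v in range(1, N + 1):
--                 grid[r][c] = v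
--                 stats["calls"] += 1
--
--                 if is_valid(grid, r, c, v, h_constraints, v_constraints, N):
--                     result = brute_force_solve(grid, h_constraints, v_constraints, N, stats)
--                     if result is not None:
--                         return result
--
--                 grid[r][c] = 0
--                 stats["backtracks"] += 1
--
--             return None
--
--     return grid
-- ===== SOURCE B (Python) =====
-- # B: iterative backtracking with an explicit stack of (r, c, v) frames instead of
-- # A's recursion; like A it mutates grid and stats in place (the equivalence claimed
-- # is about the return value).
-- from typing import Dict, List, Optional, Tuple
--
--
-- def is_valid(
--     grid: List[List[int]],
--     r: int,
--     c: int,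
--     v: int,
--     h_constraints: List[List[int]],
--     v_constraints: List[List[int]],
--     N: int,
-- ) -> bool:
--     for j in range(N):
--         if j != c and grid[r][j] == v:
--             return False
--
--     for i in range(N):
--         if i != r and grid[i][c] == v:
--             return False
--
--     if c > 0 and grid[r][c - 1] != 0:
--         left_val = grid[r][c - 1]
--         relation = h_constraints[r][c - 1]
--         if relation == 1 and not (left_val < v):
--             return False
--         if relation == -1 and not (left_val > v):
--             return False
--
--     if c < N - 1 and grid[r][c + 1] != 0:
--         right_val = grid[r][c + 1]
--         relation = h_constraints[r][c]
--         if relation == 1 and not (v < right_val):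
--             return False
--         if relation == -1 and not (v > right_val):
--             return False
--
--     if r > 0 and grid[r - 1][c] != 0:
--         top_val = grid[r - 1][c]
--         relation = v_constraints[r - 1][c]
--         if relation == 1 and not (top_val < v):
--             return False
--         if relation == -1 and not (top_val > v):
--             return False
--
--     if r < N - 1 and grid[r + 1][c] != 0:
--         bottom_val = grid[r + 1][c]
--         relation = v_constraints[r][c]
--         if relation == 1 and not (v < bottom_val):
--             return False
--         if relation == -1 and not (v > bottom_val):
--             return False
--
--     return True
--
--
-- def brute_force_solve(
--     grid: List[List[int]],
--     h_constraints: List[List[int]],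
--     v_constraints: List[List[int]],
--     N: int,
--     stats: Dict[str, int],
-- ) -> Optional[List[List[int]]]:
--     stats.setdefault("calls", 0)
--     stats.setdefault("backtracks", 0)
--
--     def first_empty() -> Optional[Tuple[int, int]]:
--         for r in range(N):
--             for c in range(N):
--                 if grid[r][c] == 0:
--                     return (r, c)
--         return None
--
--     cur = first_empty()
--     if cur is None:
--         return grid
--     r, c = cur
--     v = 1
--     stack: List[Tuple[int, int, int]] = []  # frames for cells currently assigned
--
--     while True:
--         if v > N:
--             # values for (r, c) exhausted: undo the previous frame and resume it
--             if not stack: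
--                 return None
--             r, c, v = stack.pop()
--             grid[r][c] = 0
--             stats["backtracks"] += 1
--             v += 1
--             continue
--         grid[r][c] = v
--         stats["calls"] += 1
--         if is_valid(grid, r, c, v, h_constraints, v_constraints, N):
--             stack.append((r, c, v))
--             nxt = first_empty()
--             if nxt is None:
--                 return grid
--             r, c = nxt
--             v = 1
--         else:
--             grid[r][c] = 0
--             stats["backtracks"] += 1
--             v += 1
-- ===== Notes on version B (the rewrite author's own statement) =====
-- stated objective: alternative
-- what changed: B replaces A's recursive backtracking by an iterative loop over an explicit stack of (r, c, v) frames: it pushes a frame when a value passes is_valid, and on exhaustion pops the previous frame, clears its cell and resumes its value loop; same is_valid check and same call/backtrack counters.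
-- outside the precondition, e.g. on brute_force_solve([[0]], [], [], 1, {}): A returns [[1]], B returns [[1]]
import Mathlib
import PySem

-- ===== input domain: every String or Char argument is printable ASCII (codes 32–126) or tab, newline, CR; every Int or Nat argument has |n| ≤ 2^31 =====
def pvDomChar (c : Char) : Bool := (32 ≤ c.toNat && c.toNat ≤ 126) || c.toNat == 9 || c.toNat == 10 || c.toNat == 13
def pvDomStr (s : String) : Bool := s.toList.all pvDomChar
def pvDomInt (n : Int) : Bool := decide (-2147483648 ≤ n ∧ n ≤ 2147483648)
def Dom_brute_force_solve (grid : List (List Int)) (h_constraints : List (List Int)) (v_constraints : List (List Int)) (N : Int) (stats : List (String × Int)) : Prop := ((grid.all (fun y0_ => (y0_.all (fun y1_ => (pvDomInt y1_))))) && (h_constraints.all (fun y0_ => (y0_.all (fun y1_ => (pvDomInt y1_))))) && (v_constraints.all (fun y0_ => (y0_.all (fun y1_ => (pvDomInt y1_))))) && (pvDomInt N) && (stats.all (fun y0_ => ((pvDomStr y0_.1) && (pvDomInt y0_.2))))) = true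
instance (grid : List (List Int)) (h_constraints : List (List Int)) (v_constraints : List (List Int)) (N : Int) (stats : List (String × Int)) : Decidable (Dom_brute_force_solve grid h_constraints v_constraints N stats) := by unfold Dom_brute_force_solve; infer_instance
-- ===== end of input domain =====

-- B replaces A's recursive backtracking by an iterative loop over an explicit stack
-- of (r, c, v) frames (alternative decomposition, same search order and counters).
-- Both Pythons mutate `grid` and `stats` in place; the equivalence proved here is
-- about the RETURN value only (the mutations of the two Pythons coincide as well,
-- but that is not part of the claim).

-- ===== PORT A =====
-- cell access grid[r][c] (indices produced by range(N), always in range under Pre_)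
def pvCell (grid : List (List Int)) (r c : Nat) : Int := (grid.getD r []).getD c 0

-- grid[r][c] = v
def pvSet (grid : List (List Int)) (r c : Nat) (v : Int) : List (List Int) :=
  grid.set r ((grid.getD r []).set c v)

-- the two sequential `if relation == …` tests of is_valid, as one Bool
def pvBad (a rel b : Int) : Bool :=
  (rel == 1 && !(decide (a < b))) || (rel == -1 && !(decide (a > b)))

-- shared module helper is_valid (both A and B call it unchanged)
def pvIsValid (grid : List (List Int)) (r c : Nat) (v : Int)
    (hc vc : List (List Int)) (n : Nat) : Bool :=
  if (List.range n).any (fun j => decide (j ≠ c) && (pvCell grid r j == v)) then false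
  else if (List.range n).any (fun i => decide (i ≠ r) && (pvCell grid i c == v)) then false
  else if decide (0 < c) && (pvCell grid r (c-1) != 0)
      && pvBad (pvCell grid r (c-1)) (pvCell hc r (c-1)) v then false
  else if decide (c + 1 < n) && (pvCell grid r (c+1) != 0)
      && pvBad v (pvCell hc r c) (pvCell grid r (c+1)) then false
  else if decide (0 < r) && (pvCell grid (r-1) c != 0)
      && pvBad (pvCell grid (r-1) c) (pvCell vc (r-1) c) v then false
  else if decide (r + 1 < n) && (pvCell grid (r+1) c != 0)
      && pvBad v (pvCell vc r c) (pvCell grid (r+1) c) then false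
  else true

-- the row-major (r, c) pairs visited by `for r in range(N): for c in range(N)`
def pvPairs (n : Nat) : List (Nat × Nat) := List.range n ×ˢ List.range n

-- the candidate values range(1, N + 1)
def pvVals (n : Nat) : List Int := (List.range n).map (fun (j : Nat) => (j : Int) + 1)

-- A's recursion: rescan the whole grid for the first empty cell, then try each value
-- (grid[r][c] = v; recurse on success of is_valid; first non-None result wins).
-- fuel only makes the recursion structural; n*n+1 always suffices (proved below).
def pvSolveA (hc vc : List (List Int)) (n : Nat) : Nat → List (List Int) → Option (List (List Int))
  | 0, _ => none
  | fuel+1, grid =>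
    match (pvPairs n).find? (fun p => pvCell grid p.1 p.2 == 0) with
    | none => some grid
    | some (r, c) =>
      (pvVals n).findSome? (fun v =>
        let g' := pvSet grid r c v
        if pvIsValid g' r c v hc vc n then pvSolveA hc vc n fuel g' else none)

-- stats only receives the call/backtrack counters; it never influences the result
def brute_force_solve (grid : List (List Int)) (h_constraints : List (List Int))
    (v_constraints : List (List Int)) (N : Int) (stats : List (String × Int)) :
    Option (List (List Int)) :=
  let n := N.toNat
  pvSolveA h_constraints v_constraints n (n * n + 1) grid

-- ===== PORT B =====
-- Source B's first_empty(): scan for the first empty cell in row-major order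
def pvFirstEmpty (grid : List (List Int)) (n : Nat) : Option (Nat × Nat) :=
  (pvPairs n).find? (fun p => pvCell grid p.1 p.2 == 0)

-- Source B's while loop as a step function on the machine state
-- (stack of assigned (r, c, v) frames, grid, current cell (r, c), current value v).
-- `none` = fuel ran out (never happens at the fuel used below, proved);
-- `some ans` = the loop returned `ans`.  One fuel unit per loop iteration.
def pvStep (hc vc : List (List Int)) (n : Nat) :
    Nat → List (Nat × Nat × Nat) → List (List Int) → Nat → Nat → Nat →
    Option (Option (List (List Int)))
  | 0, _, _, _, _, _ => none
  | fuel+1, stack, grid, r, c, v =>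
    if n < v then
      -- values for (r, c) exhausted: pop the previous frame, clear its cell, resume
      match stack with
      | [] => some none
      | (r', c', v') :: rest => pvStep hc vc n fuel rest (pvSet grid r' c' 0) r' c' (v' + 1)
    else
      -- grid[r][c] = v; on success push the frame and move to the next empty cell
      let g' := pvSet grid r c (v : Int)
      if pvIsValid g' r c (v : Int) hc vc n then
        match pvFirstEmpty g' n with
        | none => some (some g')
        | some (r2, c2) => pvStep hc vc n fuel ((r, c, v) :: stack) g' r2 c2 1
      else
        pvStep hc vc n fuel stack grid r c (v + 1)

-- fuel bound: pvA n k bounds the loop iterations needed per remaining value when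
-- k empty cells are still ahead (proof-side fact; the wrapper just supplies it)
def pvA (n : Nat) : Nat → Nat
  | 0 => 2
  | k+1 => 2 + n * pvA n k

def brute_force_solve_alt (grid : List (List Int)) (h_constraints : List (List Int))
    (v_constraints : List (List Int)) (N : Int) (stats : List (String × Int)) :
    Option (List (List Int)) :=
  let n := N.toNat
  match pvFirstEmpty grid n with
  | none => some grid
  | some (r, c) =>
    (pvStep h_constraints v_constraints n (n * pvA n (n * n) + 1) [] grid r c 1).getD none

-- ===== PRECONDITION & SPEC =====
-- Pre_ = the well-formed puzzle shape: an N×N grid, and — whenever the grid has an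
-- empty cell, so the search runs — N rows of N-1 horizontal constraints and N-1 rows
-- of N vertical constraints.  Outside these shapes Python's indexing raises
-- IndexError; the shape condition is slightly coarser than the exact raising set
-- (e.g. a 1×1 grid [[0]] with empty constraint lists solves without ever reading a
-- constraint), which over-exclusion is stated in the claim's cites.
def Pre_brute_force_solve (grid : List (List Int)) (h_constraints : List (List Int))
    (v_constraints : List (List Int)) (N : Int) (stats : List (String × Int)) : Prop :=
  N.toNat ≤ grid.length ∧
  (∀ i, i < N.toNat → N.toNat ≤ (grid.getD i []).length) ∧
  ((∃ p ∈ pvPairs N.toNat, pvCell grid p.1 p.2 = 0) →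
    N.toNat ≤ h_constraints.length ∧
    (∀ i, i < N.toNat → N.toNat - 1 ≤ (h_constraints.getD i []).length) ∧
    N.toNat - 1 ≤ v_constraints.length ∧
    (∀ i, i < N.toNat - 1 → N.toNat ≤ (v_constraints.getD i []).length))
instance (grid : List (List Int)) (h_constraints : List (List Int)) (v_constraints : List (List Int)) (N : Int) (stats : List (String × Int)) : Decidable (Pre_brute_force_solve grid h_constraints v_constraints N stats) := by unfold Pre_brute_force_solve; infer_instance

def pvWitness_brute_force_solve : List (List Int) × List (List Int) × List (List Int) × Int × (List (String × Int)) :=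
  ([[0, 0], [0, 0]], [[0], [0]], [[0, 0]], 2, [])

def Spec_brute_force_solve (grid : List (List Int)) (h_constraints : List (List Int)) (v_constraints : List (List Int)) (N : Int) (stats : List (String × Int)) (out : Option (List (List Int))) : Prop := out = brute_force_solve_alt grid h_constraints v_constraints N stats
instance (grid : List (List Int)) (h_constraints : List (List Int)) (v_constraints : List (List Int)) (N : Int) (stats : List (String × Int)) (out : Option (List (List Int))) : Decidable (Spec_brute_force_solve grid h_constraints v_constraints N stats out) := by unfold Spec_brute_force_solve; infer_instance

-- ===== CLAIM (what is proved, stated in full; the proofs are below) =====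
def Claim_equal_brute_force_solve : Prop := ∀ (grid : List (List Int)) (h_constraints : List (List Int)) (v_constraints : List (List Int)) (N : Int) (stats : List (String × Int)), Dom_brute_force_solve grid h_constraints v_constraints N stats → Pre_brute_force_solve grid h_constraints v_constraints N stats → Spec_brute_force_solve grid h_constraints v_constraints N stats (brute_force_solve grid h_constraints v_constraints N stats)

-- ===== LEMMAS AND PROOFS =====

-- intermediate spec: backtracking over the precomputed list of empty cells
def pvSolveB (hc vc : List (List Int)) (n : Nat) :
    List (Nat × Nat) → List (List Int) → Option (List (List Int))
  | [], grid => some grid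
  | (r, c) :: rest, grid =>
    (pvVals n).findSome? (fun v =>
      let g' := pvSet grid r c v
      if pvIsValid g' r c v hc vc n then pvSolveB hc vc n rest g' else none)

-- the value loop of pvSolveB unrolled from value v with m values left to try
def pvTryCnt (hc vc : List (List Int)) (n : Nat) (grid : List (List Int)) (r c : Nat) :
    Nat → Nat → List (Nat × Nat) → Option (List (List Int))
  | _, 0, _ => none
  | v, m+1, cells =>
    (if pvIsValid (pvSet grid r c (v : Int)) r c (v : Int) hc vc n
      then pvSolveB hc vc n cells (pvSet grid r c (v : Int)) else none).or
    (pvTryCnt hc vc n grid r c (v+1) m cells)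

theorem pvStep_succ (hc vc : List (List Int)) (n f : Nat) (stack : List (Nat × Nat × Nat))
    (grid : List (List Int)) (r c v : Nat) :
    pvStep hc vc n (f + 1) stack grid r c v =
      if n < v then
        match stack with
        | [] => some none
        | (r', c', v') :: rest => pvStep hc vc n f rest (pvSet grid r' c' 0) r' c' (v' + 1)
      else
        let g' := pvSet grid r c (v : Int)
        if pvIsValid g' r c (v : Int) hc vc n then
          match pvFirstEmpty g' n with
          | none => some (some g')
          | some (r2, c2) => pvStep hc vc n f ((r, c, v) :: stack) g' r2 c2 1
        else
          pvStep hc vc n f stack grid r c (v + 1) := rfl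

theorem pv_find?_eq_head?_filter {α : Type} (p : α → Bool) (l : List α) :
    l.find? p = (l.filter p).head? := by
  induction l with
  | nil => rfl
  | cons a t ih =>
    by_cases h : p a
    · rw [List.find?_cons_of_pos h, List.filter_cons_of_pos h]; rfl
    · rw [List.find?_cons_of_neg h, List.filter_cons_of_neg h, ih]

theorem pv_findSome?_congr {α β : Type} (l : List α) (f g : α → Option β)
    (h : ∀ x ∈ l, f x = g x) : l.findSome? f = l.findSome? g := by
  induction l with
  | nil => rfl
  | cons a t ih =>
    simp only [List.findSome?]
    rw [h a (by simp)]
    cases g a <;> simp [ih (fun x hx => h x (by simp [hx]))]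

theorem pv_filter_eq_cons {α : Type} {l : List α} {a : α} {rest : List α} {p : α → Bool}
    (h : l.filter p = a :: rest) :
    ∃ l1 l2, l = l1 ++ a :: l2 ∧ (∀ x ∈ l1, p x = false) ∧ p a = true ∧ l2.filter p = rest := by
  induction l with
  | nil => simp at h
  | cons b t ih =>
    by_cases hb : p b
    · rw [List.filter_cons_of_pos hb] at h
      obtain ⟨rfl, rfl⟩ : b = a ∧ t.filter p = rest := by simpa using h
      exact ⟨[], t, rfl, by simp, hb, rfl⟩
    · rw [List.filter_cons_of_neg hb] at h
      obtain ⟨l1, l2, rfl, h1, h2, h3⟩ := ih h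
      exact ⟨b :: l1, l2, rfl, by simpa [hb] using h1, h2, h3⟩

theorem pv_getD_set (grid : List (List Int)) (r i : Nat) (x : List Int) :
    (grid.set r x).getD i [] = if r = i ∧ r < grid.length then x else grid.getD i [] := by
  by_cases h : r = i
  · subst h
    by_cases hl : r < grid.length
    · simp [List.getD_eq_getElem?_getD, hl]
    · simp [List.set_eq_of_length_le (Nat.le_of_not_lt hl), hl]
  · simp [List.getD_eq_getElem?_getD, h]

theorem pvCell_set_ne {grid : List (List Int)} {r c r' c' : Nat} (v : Int)
    (h : (r', c') ≠ (r, c)) : pvCell (pvSet grid r c v) r' c' = pvCell grid r' c' := by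
  unfold pvCell pvSet
  rw [pv_getD_set]
  split_ifs with hif
  · obtain ⟨hre, hlen⟩ := hif
    subst hre
    have hc : c ≠ c' := by
      intro hh; exact h (by simp [hh.symm])
    simp [List.getD_eq_getElem?_getD, List.getElem?_set_ne hc]
  · rfl

theorem pvCell_set_self {grid : List (List Int)} {r c : Nat} (v : Int)
    (hr : r < grid.length) (hc : c < (grid.getD r []).length) :
    pvCell (pvSet grid r c v) r c = v := by
  unfold pvCell pvSet
  rw [pv_getD_set, if_pos ⟨rfl, hr⟩]
  rw [List.getD_eq_getElem?_getD] at hc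
  simp [List.getD_eq_getElem?_getD, hc]

theorem pvSet_length (grid : List (List Int)) (r c : Nat) (v : Int) :
    (pvSet grid r c v).length = grid.length := by
  simp [pvSet]

theorem pvSet_row_length (grid : List (List Int)) (r c : Nat) (v : Int) (i : Nat) :
    ((pvSet grid r c v).getD i []).length = ((grid.getD i []).length) := by
  unfold pvSet
  rw [pv_getD_set]
  split_ifs with hif
  · obtain ⟨hre, _⟩ := hif
    subst hre
    simp
  · rfl

theorem pvSet_set_cancel {grid : List (List Int)} {r c : Nat} (v : Int)
    (h0 : pvCell grid r c = 0) (hr : r < grid.length) :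
    pvSet (pvSet grid r c v) r c 0 = grid := by
  unfold pvSet
  rw [pv_getD_set, if_pos ⟨rfl, hr⟩, List.set_set, List.set_set]
  have hrow : grid.getD r [] = grid[r] := by
    rw [List.getD_eq_getElem?_getD, List.getElem?_eq_getElem hr]; rfl
  by_cases hc : c < (grid.getD r []).length
  · have hcell : (grid.getD r [])[c] = 0 := by
      unfold pvCell at h0
      rwa [List.getD_eq_getElem?_getD, List.getElem?_eq_getElem hc] at h0
    have h1 : (grid.getD r []).set c 0 = grid.getD r [] := by
      conv_lhs => rw [← hcell]
      exact List.set_getElem_self hc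
    rw [h1, hrow]
    exact List.set_getElem_self hr
  · have h1 : (grid.getD r []).set c 0 = grid.getD r [] :=
      List.set_eq_of_length_le (Nat.le_of_not_lt hc)
    rw [h1, hrow]
    exact List.set_getElem_self hr

theorem pv_mem_pairs {n : Nat} {p : Nat × Nat} (h : p ∈ pvPairs n) : p.1 < n ∧ p.2 < n := by
  obtain ⟨a, b⟩ := p
  simpa [pvPairs] using h

theorem pv_pairs_nodup (n : Nat) : (pvPairs n).Nodup :=
  (List.nodup_range).product (List.nodup_range)

theorem pv_filter_set {n r c : Nat} {rest : List (Nat × Nat)} {grid : List (List Int)} {v : Int}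
    (hv : v ≠ 0) (hr : r < grid.length) (hc : c < (grid.getD r []).length)
    (hfil : (pvPairs n).filter (fun p => pvCell grid p.1 p.2 == 0) = (r, c) :: rest) :
    (pvPairs n).filter (fun p => pvCell (pvSet grid r c v) p.1 p.2 == 0) = rest := by
  obtain ⟨l1, l2, hdec, h1, _, h3⟩ := pv_filter_eq_cons hfil
  have hnd : (l1 ++ (r, c) :: l2).Nodup := hdec ▸ pv_pairs_nodup n
  have hmem : (r, c) ∉ l1 ∧ (r, c) ∉ l2 := by
    have h2 := List.nodup_middle.1 hnd
    have := (List.nodup_cons.1 h2).1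
    simp only [List.mem_append] at this
    exact ⟨fun hm => this (Or.inl hm), fun hm => this (Or.inr hm)⟩
  rw [hdec, List.filter_append, List.filter_cons]
  have hmid : (pvCell (pvSet grid r c v) r c == 0) = false := by
    simp [pvCell_set_self v hr hc, hv]
  rw [hmid]
  have hl1 : l1.filter (fun p => pvCell (pvSet grid r c v) p.1 p.2 == 0) = [] := by
    apply List.filter_eq_nil_iff.2
    intro x hx
    have hne : (x.1, x.2) ≠ (r, c) := by
      intro hh; exact hmem.1 (by simpa [← hh] using hx)
    simp only [pvCell_set_ne v hne]
    simpa using h1 x hx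
  have hl2 : l2.filter (fun p => pvCell (pvSet grid r c v) p.1 p.2 == 0) = rest := by
    rw [← h3]
    apply List.filter_congr
    intro x hx
    have hne : (x.1, x.2) ≠ (r, c) := by
      intro hh; exact hmem.2 (by simpa [← hh] using hx)
    simp [pvCell_set_ne v hne]
  rw [hl1, hl2]
  simp

theorem pv_vals_pos : ∀ (l : List Nat) (v : Int), v ∈ l.map (fun (j : Nat) => (j : Int) + 1) → 0 < v := by
  intro l
  induction l with
  | nil => intro v hv; simp at hv
  | cons a t ih =>
    intro v hv
    rw [List.map_cons, List.mem_cons] at hv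
    rcases hv with h1 | h2
    · have hv1 : v = (a : Int) + 1 := h1
      omega
    · exact ih v h2

theorem pv_mem_vals {n : Nat} {v : Int} (h : v ∈ pvVals n) : v ≠ 0 := by
  have := pv_vals_pos (List.range n) v h
  omega

theorem pv_solveAB (hc vc : List (List Int)) (n : Nat) :
    ∀ (cells : List (Nat × Nat)) (fuel : Nat) (grid : List (List Int)),
      n ≤ grid.length → (∀ i, i < n → n ≤ (grid.getD i []).length) →
      (pvPairs n).filter (fun p => pvCell grid p.1 p.2 == 0) = cells →
      cells.length < fuel →
      pvSolveA hc vc n fuel grid = pvSolveB hc vc n cells grid := by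
  intro cells
  induction cells with
  | nil =>
    intro fuel grid _ _ hfil hfuel
    match fuel, hfuel with
    | fuel + 1, _ =>
      simp [pvSolveA, pvSolveB, pv_find?_eq_head?_filter, hfil]
  | cons rc rest ih =>
    obtain ⟨r, c⟩ := rc
    intro fuel grid hlen hrow hfil hfuel
    match fuel, hfuel with
    | fuel + 1, hfuel =>
      have hmemp : (r, c) ∈ pvPairs n := by
        have : (r, c) ∈ (pvPairs n).filter (fun p => pvCell grid p.1 p.2 == 0) := by
          rw [hfil]; simp
        exact List.mem_of_mem_filter this
      obtain ⟨hrn, hcn⟩ := pv_mem_pairs hmemp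
      have hrl : r < grid.length := Nat.lt_of_lt_of_le hrn hlen
      have hcl : c < (grid.getD r []).length := Nat.lt_of_lt_of_le hcn (hrow r hrn)
      show pvSolveA hc vc n (fuel + 1) grid = _
      rw [pvSolveA, pv_find?_eq_head?_filter, hfil]
      show _ = pvSolveB hc vc n ((r, c) :: rest) grid
      rw [pvSolveB]
      apply pv_findSome?_congr
      intro v hv
      simp only []
      by_cases hval : pvIsValid (pvSet grid r c v) r c v hc vc n
      · simp only [hval, if_true]
        apply ih
        · rw [pvSet_length]; exact hlen
        · intro i hi; rw [pvSet_row_length]; exact hrow i hi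
        · exact pv_filter_set (pv_mem_vals hv) hrl hcl hfil
        · have : rest.length + 1 < fuel + 1 := by simpa using hfuel
          omega
      · simp [hval]


-- pvA facts
theorem pvA_ge_two (n : Nat) : ∀ k, 2 ≤ pvA n k := by
  intro k; cases k with
  | zero => simp [pvA]
  | succ k => simp [pvA]

theorem pvA_mono (n : Nat) : ∀ {k k' : Nat}, k ≤ k' → pvA n k ≤ pvA n k' := by
  have hstep : ∀ k, pvA n k ≤ pvA n (k + 1) := by
    intro k
    induction k with
    | zero => simp [pvA]
    | succ k ih =>
      show 2 + n * pvA n k ≤ 2 + n * pvA n (k + 1)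
      exact Nat.add_le_add_left (Nat.mul_le_mul_left n ih) 2
  intro k k' h
  exact monotone_nat_of_le_succ hstep h

-- the value loop of pvTryCnt as a findSome? over the corresponding value list
theorem pv_tryCnt_eq (hc vc : List (List Int)) (n : Nat) (r c : Nat) (cells : List (Nat × Nat)) :
    ∀ (m v : Nat) (grid : List (List Int)),
      pvTryCnt hc vc n grid r c v m cells =
      ((List.range m).map (fun j => ((v + j : Nat) : Int))).findSome?
        (fun w => if pvIsValid (pvSet grid r c w) r c w hc vc n
          then pvSolveB hc vc n cells (pvSet grid r c w) else none) := by
  intro m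
  induction m with
  | zero => intro v grid; simp [pvTryCnt]
  | succ m ih =>
    intro v grid
    rw [List.range_succ_eq_map, List.map_cons, List.map_map, List.findSome?_cons]
    have hmap : ((List.range m).map ((fun j => ((v + j : Nat) : Int)) ∘ Nat.succ))
        = (List.range m).map (fun j => (((v + 1) + j : Nat) : Int)) := by
      apply List.map_congr_left
      intro j _
      show ((v + (j + 1) : Nat) : Int) = (((v + 1) + j : Nat) : Int)
      congr 1
      omega
    rw [hmap, ← ih (v + 1) grid]
    show pvTryCnt hc vc n grid r c v (m + 1) cells = _
    rw [pvTryCnt]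
    simp only [Nat.add_zero]
    cases hx : (if pvIsValid (pvSet grid r c ((v : Nat) : Int)) r c ((v : Nat) : Int) hc vc n
        then pvSolveB hc vc n cells (pvSet grid r c ((v : Nat) : Int)) else none) with
    | none => simp [Option.or]
    | some g => simp [Option.or]

theorem pv_solveB_cons (hc vc : List (List Int)) (n : Nat) (grid : List (List Int))
    (r c : Nat) (cells : List (Nat × Nat)) :
    pvSolveB hc vc n ((r, c) :: cells) grid = pvTryCnt hc vc n grid r c 1 n cells := by
  rw [pv_tryCnt_eq]
  show (pvVals n).findSome? _ = _
  have hv : pvVals n = (List.range n).map (fun j => ((1 + j : Nat) : Int)) := by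
    unfold pvVals
    apply List.map_congr_left
    intro j _
    push_cast
    ring
  rw [hv]

-- correctness of the stack machine against pvSolveB, with an explicit fuel bound
theorem pv_machine (hc vc : List (List Int)) (n : Nat) :
    ∀ (cells : List (Nat × Nat)) (grid : List (List Int)) (r c : Nat)
      (stack : List (Nat × Nat × Nat)) (fR : Nat) (R : Option (List (List Int))),
      n ≤ grid.length →
      (∀ i, i < n → n ≤ (grid.getD i []).length) →
      (pvPairs n).filter (fun p => pvCell grid p.1 p.2 == 0) = (r, c) :: cells →
      (∀ f, fR ≤ f → pvStep hc vc n f stack grid r c (n + 1) = some R) →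
      ∀ (m : Nat), ∀ (v : Nat), 1 ≤ v → v + m = n + 1 →
      ∀ f, m * pvA n cells.length + fR ≤ f →
        pvStep hc vc n f stack grid r c v = some ((pvTryCnt hc vc n grid r c v m cells).or R) := by
  intro cells
  induction cells with
  | nil =>
    intro grid r c stack fR R hlen hrow hfil hpop m
    induction m with
    | zero =>
      intro v _ hv f hf
      obtain rfl : v = n + 1 := by omega
      rw [show pvTryCnt hc vc n grid r c (n + 1) 0 [] = none from rfl, Option.none_or]
      exact hpop f (by omega)
    | succ m ihm =>
      intro v hv1 hv f hf
      have hA := pvA_ge_two n ([] : List (Nat × Nat)).length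
      have hmul : pvA n ([] : List (Nat × Nat)).length ≤ (m + 1) * pvA n ([] : List (Nat × Nat)).length :=
        Nat.le_mul_of_pos_left _ (Nat.succ_pos m)
      have hsm : (m + 1) * pvA n ([] : List (Nat × Nat)).length
          = m * pvA n ([] : List (Nat × Nat)).length + pvA n ([] : List (Nat × Nat)).length :=
        Nat.succ_mul _ _
      obtain ⟨f', rfl⟩ : ∃ f', f = f' + 1 := ⟨f - 1, by omega⟩
      have hmemp : (r, c) ∈ pvPairs n := by
        have : (r, c) ∈ (pvPairs n).filter (fun p => pvCell grid p.1 p.2 == 0) := by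
          rw [hfil]; simp
        exact List.mem_of_mem_filter this
      obtain ⟨hrn, hcn⟩ := pv_mem_pairs hmemp
      have hrl : r < grid.length := Nat.lt_of_lt_of_le hrn hlen
      have hcl : c < (grid.getD r []).length := Nat.lt_of_lt_of_le hcn (hrow r hrn)
      have hvne : ((v : Nat) : Int) ≠ 0 := by
        exact_mod_cast (by omega : (v : Nat) ≠ 0)
      rw [pvStep_succ, if_neg (by omega : ¬ n < v)]
      by_cases hval : pvIsValid (pvSet grid r c (v : Int)) r c (v : Int) hc vc n
      · have hfe : pvFirstEmpty (pvSet grid r c (v : Int)) n = none := by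
          unfold pvFirstEmpty
          rw [pv_find?_eq_head?_filter, pv_filter_set hvne hrl hcl hfil]
          rfl
        simp only [hval, if_true, hfe]
        rw [pvTryCnt]
        simp [pvSolveB, hval, Option.or]
      · simp only [hval]
        rw [pvTryCnt]
        simp only [hval]
        exact ihm (v + 1) (by omega) (by omega) f' (by omega)
  | cons rc2 rest ih =>
    obtain ⟨r2, c2⟩ := rc2
    intro grid r c stack fR R hlen hrow hfil hpop m
    induction m with
    | zero =>
      intro v _ hv f hf
      obtain rfl : v = n + 1 := by omega
      rw [show pvTryCnt hc vc n grid r c (n + 1) 0 ((r2, c2) :: rest) = none from rfl, Option.none_or]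
      exact hpop f (by omega)
    | succ m ihm =>
      intro v hv1 hv f hf
      have hA := pvA_ge_two n ((r2, c2) :: rest).length
      have hA' := pvA_ge_two n rest.length
      have hAk : pvA n ((r2, c2) :: rest).length = 2 + n * pvA n rest.length := by
        simp [pvA]
      have hsm : (m + 1) * pvA n ((r2, c2) :: rest).length
          = m * pvA n ((r2, c2) :: rest).length + pvA n ((r2, c2) :: rest).length :=
        Nat.succ_mul _ _
      -- name the two products so the fuel arithmetic is linear
      generalize hX : m * pvA n ((r2, c2) :: rest).length = X at hsm hf ihm ⊢
      generalize hY : n * pvA n rest.length = Y at hAk hf hsm ⊢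
      obtain ⟨f', rfl⟩ : ∃ f', f = f' + 1 := ⟨f - 1, by omega⟩
      have hmemp : (r, c) ∈ pvPairs n := by
        have : (r, c) ∈ (pvPairs n).filter (fun p => pvCell grid p.1 p.2 == 0) := by
          rw [hfil]; simp
        exact List.mem_of_mem_filter this
      obtain ⟨hrn, hcn⟩ := pv_mem_pairs hmemp
      have hrl : r < grid.length := Nat.lt_of_lt_of_le hrn hlen
      have hcl : c < (grid.getD r []).length := Nat.lt_of_lt_of_le hcn (hrow r hrn)
      have h0 : pvCell grid r c = 0 := by
        have : (r, c) ∈ (pvPairs n).filter (fun p => pvCell grid p.1 p.2 == 0) := by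
          rw [hfil]; simp
        have := List.of_mem_filter this
        simpa using this
      have hvne : ((v : Nat) : Int) ≠ 0 := by
        exact_mod_cast (by omega : (v : Nat) ≠ 0)
      rw [pvStep_succ, if_neg (by omega : ¬ n < v)]
      by_cases hval : pvIsValid (pvSet grid r c (v : Int)) r c (v : Int) hc vc n
      · have hfil' : (pvPairs n).filter
            (fun p => pvCell (pvSet grid r c (v : Int)) p.1 p.2 == 0) = (r2, c2) :: rest :=
          pv_filter_set hvne hrl hcl hfil
        have hfe : pvFirstEmpty (pvSet grid r c (v : Int)) n = some (r2, c2) := by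
          unfold pvFirstEmpty
          rw [pv_find?_eq_head?_filter, hfil']
          rfl
        simp only [hval, if_true, hfe]
        -- pop continuation for the pushed frame
        have hpop' : ∀ f2, X + fR + 1 ≤ f2 →
            pvStep hc vc n f2 ((r, c, v) :: stack) (pvSet grid r c (v : Int)) r2 c2 (n + 1)
              = some ((pvTryCnt hc vc n grid r c (v + 1) m ((r2, c2) :: rest)).or R) := by
          intro f2 h2
          obtain ⟨f2', rfl⟩ : ∃ f2', f2 = f2' + 1 := ⟨f2 - 1, by omega⟩
          rw [pvStep_succ, if_pos (by omega : n < n + 1)]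
          show pvStep hc vc n f2' stack (pvSet (pvSet grid r c (v : Int)) r c 0) r c (v + 1)
            = some ((pvTryCnt hc vc n grid r c (v + 1) m ((r2, c2) :: rest)).or R)
          rw [pvSet_set_cancel (v : Int) h0 hrl]
          exact ihm (v + 1) (by omega) (by omega) f2' (by omega)
        have := ih (pvSet grid r c (v : Int)) r2 c2 ((r, c, v) :: stack) (X + fR + 1)
          ((pvTryCnt hc vc n grid r c (v + 1) m ((r2, c2) :: rest)).or R)
          (by rw [pvSet_length]; exact hlen)
          (by intro i hi; rw [pvSet_row_length]; exact hrow i hi)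
          hfil' hpop' n 1 (by omega) (by omega) f' (by rw [hY]; omega)
        rw [this]
        rw [pvTryCnt]
        simp only [hval, if_true]
        rw [pv_solveB_cons, Option.or_assoc]
      · simp only [hval]
        rw [pvTryCnt]
        simp only [hval]
        exact ihm (v + 1) (by omega) (by omega) f' (by omega)
-- ===== VERDICT (by name: the statement is the Claim_ definition above) =====
theorem brute_force_solve_spec : Claim_equal_brute_force_solve := by
  intro grid h_constraints v_constraints N stats _ hpre
  unfold Spec_brute_force_solve brute_force_solve brute_force_solve_alt
  obtain ⟨hlen, hrow, _⟩ := hpre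
  have hA : pvSolveA h_constraints v_constraints N.toNat (N.toNat * N.toNat + 1) grid
      = pvSolveB h_constraints v_constraints N.toNat
        ((pvPairs N.toNat).filter (fun p => pvCell grid p.1 p.2 == 0)) grid := by
    apply pv_solveAB _ _ _ _ _ _ hlen hrow rfl
    calc ((pvPairs N.toNat).filter _).length ≤ (pvPairs N.toNat).length :=
          List.length_filter_le _ _
      _ = N.toNat * N.toNat := by simp [pvPairs, List.length_product]
      _ < N.toNat * N.toNat + 1 := Nat.lt_succ_self _
  rw [hA]
  cases hcl : (pvPairs N.toNat).filter (fun p => pvCell grid p.1 p.2 == 0) with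
  | nil =>
    have hfe : pvFirstEmpty grid N.toNat = none := by
      unfold pvFirstEmpty; rw [pv_find?_eq_head?_filter, hcl]; rfl
    simp [hfe, pvSolveB]
  | cons rc cells =>
    obtain ⟨r, c⟩ := rc
    have hfe : pvFirstEmpty grid N.toNat = some (r, c) := by
      unfold pvFirstEmpty; rw [pv_find?_eq_head?_filter, hcl]; rfl
    have hcle : cells.length ≤ N.toNat * N.toNat := by
      have : ((r, c) :: cells).length ≤ (pvPairs N.toNat).length := by
        rw [← hcl]; exact List.length_filter_le _ _
      simp [pvPairs, List.length_product] at this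
      omega
    have hpop : ∀ f, 1 ≤ f →
        pvStep h_constraints v_constraints N.toNat f [] grid r c (N.toNat + 1) = some none := by
      intro f hf
      obtain ⟨f', rfl⟩ : ∃ f', f = f' + 1 := ⟨f - 1, by omega⟩
      rw [pvStep_succ, if_pos (by omega : N.toNat < N.toNat + 1)]
    have hmach := pv_machine h_constraints v_constraints N.toNat cells grid r c [] 1 none
      hlen hrow hcl hpop N.toNat 1 (by omega) (by omega)
      (N.toNat * pvA N.toNat (N.toNat * N.toNat) + 1)
      (by
        have := Nat.mul_le_mul_left N.toNat (pvA_mono N.toNat hcle)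
        omega)
    simp only [hfe, hmach]
    rw [Option.getD_some, Option.or_none, pv_solveB_cons]
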